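-- pv_equiv track=rewrite | github.com/maksymstets/Peptide-predictor | Peptide predictor/pattern.py | papain_logic
-- ===== SOURCE A (Python) =====
-- def papain_logic(content):
--     #This function splits the sequence according to the cleavage site. Mimics papain behaviour.
--     cleavage_sites = []
--
--     for site in range(len(content) - 1):
--         cleavage = False
--         P1 = content[site]
--         P2 = content[site - 1] if site > 0 else None
--         P1_prime = content[site + 1]
--         if (P1 == "R" or P1 == "K") and (P2 == "A" or P2 == "V" or P2 == "L" or P2 == "I" or P2 == "F" or P2 == "W" or P2 == "Y"):
--             cleavage = True
--         if P1_prime == "V":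
--             cleavage = False
--         if cleavage:
--             cleavage_sites.append(site + 1)
--     return cleavage_sites
-- ===== SOURCE B (Python) =====
-- def papain_logic(content):
--     # Staged set construction: build three index sets in independent passes
--     # (P1 core positions, positions preceded by a hydrophobic residue, positions
--     # followed by a non-V residue), intersect them, and return the sorted sites.
--     cores = {i for i, c in enumerate(content) if c == "R" or c == "K"}
--     after_hydrophobic = {i + 1 for i, c in enumerate(content) if c in "AVLIFWY"}
--     before_non_v = {i - 1 for i, c in enumerate(content) if c != "V"}
--     return sorted(i + 1 for i in cores & after_hydrophobic & before_non_v)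
-- ===== Notes on version B (the rewrite author's own statement) =====
-- stated objective: alternative
-- what changed: Replaces A's single index loop with a mutable cleavage flag and conditional neighbour lookups by three independent set-comprehension passes (P1 core positions, positions after a hydrophobic residue, positions before a non-V residue) whose intersection is sorted into the result.
import Mathlib
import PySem

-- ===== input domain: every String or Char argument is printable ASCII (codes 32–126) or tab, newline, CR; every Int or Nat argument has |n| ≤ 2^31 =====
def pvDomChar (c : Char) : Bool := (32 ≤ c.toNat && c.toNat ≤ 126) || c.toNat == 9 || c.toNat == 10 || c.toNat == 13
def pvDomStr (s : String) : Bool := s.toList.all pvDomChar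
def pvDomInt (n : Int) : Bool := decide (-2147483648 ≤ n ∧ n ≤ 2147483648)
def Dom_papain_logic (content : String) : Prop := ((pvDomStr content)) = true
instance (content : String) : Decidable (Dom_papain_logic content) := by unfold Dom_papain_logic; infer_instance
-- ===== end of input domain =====

-- B replaces A's single index loop (with its mutable cleavage flag) by three independent
-- index-set passes intersected and sorted; proved equal on all inputs.
-- ===== PORT A =====
-- A-side helper: the body of A's for-loop, verbatim (P1/P2/P1_prime lookups, the two cleavage updates).
def pvBodyA (cs : List Char) (cleavage_sites : List Int) (site : Int) : List Int :=
  let cleavage : Bool := false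
  let P1 := PySem.List.pyGet? cs site
  let P2 := if site > 0 then PySem.List.pyGet? cs (site - 1) else none
  let P1_prime := PySem.List.pyGet? cs (site + 1)
  let cleavage :=
    if (P1 == some 'R' || P1 == some 'K') &&
       (P2 == some 'A' || P2 == some 'V' || P2 == some 'L' || P2 == some 'I' ||
        P2 == some 'F' || P2 == some 'W' || P2 == some 'Y')
    then true else cleavage
  let cleavage := if P1_prime == some 'V' then false else cleavage
  if cleavage then cleavage_sites ++ [site + 1] else cleavage_sites

def papain_logic (content : String) : List Int :=
  let cs := content.toList
  (PySem.List.pyRange 0 ((cs.length : Int) - 1) 1).foldl (pvBodyA cs) []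

-- ===== PORT B =====
-- B's helpers: the three set comprehensions of Source B, each one pass over enumerate(content).
def pvCores (cs : List Char) : PySem.Set Int :=
  PySem.Set.ofList ((PySem.List.enumerate cs 0).filterMap
    (fun p => if p.2 == 'R' || p.2 == 'K' then some p.1 else none))

def pvAfterHydrophobic (cs : List Char) : PySem.Set Int :=
  PySem.Set.ofList ((PySem.List.enumerate cs 0).filterMap
    (fun p => if "AVLIFWY".toList.contains p.2 then some (p.1 + 1) else none))

def pvBeforeNonV (cs : List Char) : PySem.Set Int :=
  PySem.Set.ofList ((PySem.List.enumerate cs 0).filterMap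
    (fun p => if p.2 != 'V' then some (p.1 - 1) else none))

def papain_logic_alt (content : String) : List Int :=
  let cs := content.toList
  let sites := PySem.Set.inter (PySem.Set.inter (pvCores cs) (pvAfterHydrophobic cs)) (pvBeforeNonV cs)
  PySem.List.sorted (sites.map (fun i => i + 1)) (fun x => x) false

-- ===== PRECONDITION & SPEC =====
def Spec_papain_logic (content : String) (out : List Int) : Prop := out = papain_logic_alt content
instance (content : String) (out : List Int) : Decidable (Spec_papain_logic content out) := by unfold Spec_papain_logic; infer_instance

-- ===== CLAIM (what is proved, stated in full; the proofs are below) =====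
def Claim_equal_papain_logic : Prop := ∀ (content : String), Dom_papain_logic content → Spec_papain_logic content (papain_logic content)

-- ===== LEMMAS AND PROOFS =====

-- The combined cleavage condition at an Int site (proof-side characterisation).
def pvGoodI (cs : List Char) (site : Int) : Bool :=
  (PySem.List.pyGet? cs site == some 'R' || PySem.List.pyGet? cs site == some 'K') &&
  decide (0 < site) &&
  (PySem.List.pyGet? cs (site - 1) == some 'A' || PySem.List.pyGet? cs (site - 1) == some 'V' ||
   PySem.List.pyGet? cs (site - 1) == some 'L' || PySem.List.pyGet? cs (site - 1) == some 'I' ||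
   PySem.List.pyGet? cs (site - 1) == some 'F' || PySem.List.pyGet? cs (site - 1) == some 'W' ||
   PySem.List.pyGet? cs (site - 1) == some 'Y') &&
  (PySem.List.pyGet? cs (site + 1) != some 'V')

-- The canonical site list both ports are reduced to.
def pvT (cs : List Char) : List Int :=
  ((PySem.List.pyRange 0 ((cs.length : Int) - 1) 1).filter (pvGoodI cs)).map (fun s => s + 1)

-- The same condition at a Nat index, as a Prop over getElem?.
def pvQ (cs : List Char) (k : Nat) : Prop :=
  1 ≤ k ∧
  (∃ c, cs[k]? = some c ∧ (c = 'R' ∨ c = 'K')) ∧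
  (∃ c, cs[k-1]? = some c ∧ c ∈ (['A','V','L','I','F','W','Y'] : List Char)) ∧
  (∃ c, cs[k+1]? = some c ∧ c ≠ 'V')

lemma pv_body_eq (cs : List Char) (acc : List Int) (site : Int) :
    pvBodyA cs acc site = if pvGoodI cs site then acc ++ [site + 1] else acc := by
  by_cases h0 : 0 < site
  · simp only [pvBodyA, pvGoodI, gt_iff_lt, h0, if_true, decide_true, Bool.and_true, bne]
    generalize (PySem.List.pyGet? cs site == some 'R' || PySem.List.pyGet? cs site == some 'K') = a
    generalize (PySem.List.pyGet? cs (site - 1) == some 'A' || PySem.List.pyGet? cs (site - 1) == some 'V' ||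
      PySem.List.pyGet? cs (site - 1) == some 'L' || PySem.List.pyGet? cs (site - 1) == some 'I' ||
      PySem.List.pyGet? cs (site - 1) == some 'F' || PySem.List.pyGet? cs (site - 1) == some 'W' ||
      PySem.List.pyGet? cs (site - 1) == some 'Y') = b
    generalize (PySem.List.pyGet? cs (site + 1) == some 'V') = v
    cases a <;> cases b <;> cases v <;> simp
  · simp only [pvBodyA, pvGoodI, gt_iff_lt, h0, if_false, decide_false, bne]
    generalize (PySem.List.pyGet? cs (site + 1) == some 'V') = v
    cases v <;> simp

lemma pv_A_eq_T (content : String) : papain_logic content = pvT content.toList := by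
  unfold papain_logic pvT
  rw [PySem.List.foldl_congr_mem _ (pvBodyA content.toList)
        (fun acc x => if pvGoodI content.toList x then acc ++ [x + 1] else acc) []
        (fun acc x _ => pv_body_eq content.toList acc x),
      PySem.List.foldl_append_if]
  simp

lemma pv_goodI_iff (cs : List Char) (site : Int) (hlo : 0 ≤ site) (hhi : site < (cs.length : Int) - 1) :
    pvGoodI cs site = true ↔ ∃ k : Nat, pvQ cs k ∧ site = (k : Int) := by
  obtain ⟨k, rfl⟩ : ∃ k : Nat, site = (k : Int) := ⟨site.toNat, by omega⟩
  have hk1 : k + 1 < cs.length := by exact_mod_cast (by omega : (k : Int) + 1 < (cs.length : Int))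
  have e1 : PySem.List.pyGet? cs (k : Int) = some cs[k] := by
    rw [PySem.List.pyGet?_natCast]; exact List.getElem?_eq_getElem (by omega)
  have e3 : PySem.List.pyGet? cs ((k : Int) + 1) = some cs[k+1] := by
    rw [show ((k:Int) + 1) = ((k+1 : Nat) : Int) by omega, PySem.List.pyGet?_natCast]
    exact List.getElem?_eq_getElem hk1
  constructor
  · intro h
    simp only [pvGoodI, Bool.and_eq_true, decide_eq_true_eq] at h
    obtain ⟨⟨⟨h1, hpos⟩, h2⟩, h3⟩ := h
    have hkpos : 1 ≤ k := by omega
    have e2 : PySem.List.pyGet? cs ((k : Int) - 1) = some cs[k-1] := by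
      rw [show ((k:Int) - 1) = ((k-1 : Nat) : Int) by omega, PySem.List.pyGet?_natCast]
      exact List.getElem?_eq_getElem (by omega)
    rw [e1] at h1; rw [e2] at h2; rw [e3] at h3
    simp only [Bool.or_eq_true, beq_iff_eq, Option.some.injEq] at h1 h2
    simp only [bne_iff_ne, ne_eq, Option.some.injEq] at h3
    exact ⟨k, ⟨hkpos,
      ⟨cs[k], List.getElem?_eq_getElem (by omega), h1⟩,
      ⟨cs[k-1], List.getElem?_eq_getElem (by omega), by simp only [List.mem_cons, List.not_mem_nil, or_false]; tauto⟩,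
      ⟨cs[k+1], List.getElem?_eq_getElem hk1, h3⟩⟩, rfl⟩
  · rintro ⟨k', hQ, hk⟩
    have hkk : k' = k := by omega
    subst hkk
    obtain ⟨hkpos, ⟨c1, hc1, hrk⟩, ⟨c2, hc2, hhyd⟩, ⟨c3, hc3, hnv⟩⟩ := hQ
    have e2 : PySem.List.pyGet? cs ((k' : Int) - 1) = some c2 := by
      rw [show ((k':Int) - 1) = ((k'-1 : Nat) : Int) by omega, PySem.List.pyGet?_natCast]
      exact hc2
    obtain ⟨hb1, rfl⟩ := List.getElem?_eq_some_iff.mp hc1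
    obtain ⟨hb3, rfl⟩ := List.getElem?_eq_some_iff.mp hc3
    simp only [pvGoodI, e1, e2, e3, Bool.and_eq_true, Bool.or_eq_true, beq_iff_eq,
      Option.some.injEq, decide_eq_true_eq, bne_iff_ne, ne_eq]
    simp only [List.mem_cons, List.not_mem_nil, or_false] at hhyd
    refine ⟨⟨⟨hrk, by omega⟩, by tauto⟩, by simpa using hnv⟩

lemma pv_mem_T (cs : List Char) (x : Int) :
    x ∈ pvT cs ↔ ∃ k : Nat, pvQ cs k ∧ x = (k : Int) + 1 := by
  unfold pvT
  simp only [List.mem_map, List.mem_filter, PySem.List.mem_pyRange_one]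
  constructor
  · rintro ⟨site, ⟨⟨hlo, hhi⟩, hg⟩, rfl⟩
    obtain ⟨k, hQ, rfl⟩ := (pv_goodI_iff cs site hlo hhi).mp hg
    exact ⟨k, hQ, rfl⟩
  · rintro ⟨k, hQ, rfl⟩
    have hk1 : k + 1 < cs.length := by
      obtain ⟨-, -, -, c3, hc3, -⟩ := hQ
      obtain ⟨hb, -⟩ := List.getElem?_eq_some_iff.mp hc3
      exact hb
    have hlo : (0:Int) ≤ (k:Int) := by positivity
    have hhi : (k:Int) < (cs.length : Int) - 1 := by
      have : ((k:Int) + 1) < (cs.length : Int) := by exact_mod_cast hk1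
      omega
    exact ⟨k, ⟨⟨hlo, hhi⟩, (pv_goodI_iff cs (k:Int) hlo hhi).mpr ⟨k, hQ, rfl⟩⟩, rfl⟩

lemma pv_mem_sites (cs : List Char) (i : Int) :
    i ∈ PySem.Set.inter (PySem.Set.inter (pvCores cs) (pvAfterHydrophobic cs)) (pvBeforeNonV cs) ↔
      ∃ k : Nat, pvQ cs k ∧ i = (k : Int) := by
  have hs : "AVLIFWY".toList = ['A','V','L','I','F','W','Y'] := rfl
  rw [PySem.Set.mem_inter, PySem.Set.mem_inter]
  unfold pvCores pvAfterHydrophobic pvBeforeNonV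
  simp only [PySem.Set.mem_ofList, List.mem_filterMap, Option.ite_none_right_eq_some,
    Option.some.injEq, Bool.or_eq_true, beq_iff_eq, bne_iff_ne, ne_eq, hs]
  constructor
  · rintro ⟨⟨⟨p1, hp1, hrk, rfl⟩, ⟨p2, hp2, hhyd, hi2⟩⟩, ⟨p3, hp3, hnv, hi3⟩⟩
    rw [PySem.List.mem_enumerate_iff] at hp1 hp2 hp3
    obtain ⟨k, hk, rfl⟩ := hp1
    obtain ⟨k2, hk2, rfl⟩ := hp2
    obtain ⟨k3, hk3, rfl⟩ := hp3
    simp only [zero_add] at hi2 hi3 hrk hhyd hnv ⊢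
    have ek2 : k2 = k - 1 := by omega
    have ek3 : k3 = k + 1 := by omega
    have hk1 : 1 ≤ k := by omega
    subst ek2 ek3
    refine ⟨k, ⟨hk1, ⟨cs[k], List.getElem?_eq_getElem hk, by simpa using hrk⟩,
      ⟨cs[k-1], List.getElem?_eq_getElem hk2, by simpa [List.contains_eq_mem] using hhyd⟩,
      ⟨cs[k+1], List.getElem?_eq_getElem hk3, hnv⟩⟩, rfl⟩
  · rintro ⟨k, ⟨hk1, ⟨c1, hc1, hrk⟩, ⟨c2, hc2, hhyd⟩, ⟨c3, hc3, hnv⟩⟩, rfl⟩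
    obtain ⟨hkb, hc1'⟩ := List.getElem?_eq_some_iff.mp hc1
    obtain ⟨hkb2, hc2'⟩ := List.getElem?_eq_some_iff.mp hc2
    obtain ⟨hkb3, hc3'⟩ := List.getElem?_eq_some_iff.mp hc3
    refine ⟨⟨⟨((k:Int), c1), ?_, by tauto, rfl⟩, ⟨(((k-1:Nat):Int), c2), ?_, ?_, by omega⟩⟩,
      ⟨(((k+1:Nat):Int), c3), ?_, hnv, by omega⟩⟩
    · rw [PySem.List.mem_enumerate_iff]; exact ⟨k, hkb, by simp [hc1']⟩
    · rw [PySem.List.mem_enumerate_iff]; exact ⟨k-1, hkb2, by simp [hc2']⟩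
    · subst hc2'; simpa [List.contains_eq_mem] using hhyd
    · rw [PySem.List.mem_enumerate_iff]; exact ⟨k+1, hkb3, by simp [hc3']⟩

lemma pv_T_pairwise (cs : List Char) : (pvT cs).Pairwise (· < ·) := by
  unfold pvT
  exact List.Pairwise.map _ (fun a b h => by omega)
    ((PySem.List.pairwise_lt_pyRange_one 0 _).filter _)

lemma pv_B_eq_T (content : String) : papain_logic_alt content = pvT content.toList := by
  simp only [papain_logic_alt]
  apply PySem.List.sorted_eq_of_perm_of_pairwise_lt
  · -- pvT is a permutation of the mapped intersection: both Nodup with the same members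
    apply (List.perm_ext_iff_of_nodup
      ((pv_T_pairwise content.toList).imp (fun {a b} h => ne_of_lt h))
      (((PySem.Set.nodup_inter _ _
          (PySem.Set.nodup_inter _ _ (PySem.Set.nodup_ofList _))).map
          (fun a b h => by omega)))).mpr
    intro x
    rw [pv_mem_T, List.mem_map]
    constructor
    · rintro ⟨k, hQ, rfl⟩
      exact ⟨(k:Int), (pv_mem_sites content.toList (k:Int)).mpr ⟨k, hQ, rfl⟩, rfl⟩
    · rintro ⟨i, hi, rfl⟩
      obtain ⟨k, hQ, rfl⟩ := (pv_mem_sites content.toList i).mp hi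
      exact ⟨k, hQ, rfl⟩
  · exact pv_T_pairwise content.toList

-- ===== VERDICT (by name: the statement is the Claim_ definition above) =====
theorem papain_logic_spec : Claim_equal_papain_logic := by
  intro content _
  unfold Spec_papain_logic
  rw [pv_A_eq_T, pv_B_eq_T]
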